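-- pv_equiv track=rewrite | github.com/ccanalesb/lightroom-tagger | lightroom_tagger/instagram/deduplicator.py | select_best_version
-- ===== SOURCE A (Python) =====
-- def is_from_posts_folder(file_path: str) -> bool:
--     """Check if file is from posts folder (higher priority)."""
--     return '/posts/' in file_path or file_path.split('/media/')[-1].startswith('posts/')
--
-- def select_best_version(hash_group: list[dict]) -> dict:
--     """Select the best version from a group of duplicates.
--
--     Priority:
--     1. Posts folder over archived_posts
--     2. If multiple in same folder, pick first (or could use file size/modified date)
--
--     Args:
--         hash_group: List of media files with same hash
--
--     Returns:
--         Best media file dict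
--     """
--     if len(hash_group) == 1:
--         return hash_group[0]
--
--     # Separate into posts and archived
--     posts_versions = [m for m in hash_group if is_from_posts_folder(m.get('file_path', ''))]
--     archived_versions = [m for m in hash_group if not is_from_posts_folder(m.get('file_path', ''))]
--
--     # Prefer posts
--     if posts_versions:
--         return posts_versions[0]
--
--     # Otherwise use first archived
--     return archived_versions[0] if archived_versions else hash_group[0]
-- ===== SOURCE B (Python) =====
-- def is_from_posts_folder(file_path: str) -> bool:
--     """Check if file is from posts folder (higher priority)."""
--     return '/posts/' in file_path or file_path.split('/media/')[-1].startswith('posts/')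
--
-- def select_best_version(hash_group: list[dict]) -> dict:
--     """Stable min over the group keyed by folder priority (0 = posts, 1 = archived):
--     returns the first posts-folder member if any, else the first member."""
--     return min(hash_group,
--                key=lambda m: 0 if is_from_posts_folder(m.get('file_path', '')) else 1)
-- ===== Notes on version B (the rewrite author's own statement) =====
-- stated objective: simpler
-- what changed: Replaces the len==1 special case plus two partitioning comprehensions with a single stable min over the group keyed by a 0/1 folder priority (a one-pass running-minimum accumulator instead of staged filters).
import Mathlib
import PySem

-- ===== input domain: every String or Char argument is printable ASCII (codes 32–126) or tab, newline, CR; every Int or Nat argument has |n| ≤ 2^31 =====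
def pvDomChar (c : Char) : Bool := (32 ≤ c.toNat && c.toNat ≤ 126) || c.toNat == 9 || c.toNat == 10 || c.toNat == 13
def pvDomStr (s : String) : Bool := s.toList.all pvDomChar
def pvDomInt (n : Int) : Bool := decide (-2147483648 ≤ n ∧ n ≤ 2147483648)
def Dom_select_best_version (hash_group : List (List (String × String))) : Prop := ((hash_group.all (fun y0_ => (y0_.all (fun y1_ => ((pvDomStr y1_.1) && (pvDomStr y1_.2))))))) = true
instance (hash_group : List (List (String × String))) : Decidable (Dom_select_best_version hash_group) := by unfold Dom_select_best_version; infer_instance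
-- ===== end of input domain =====

-- B replaces A's len==1 special case and two partitioning comprehensions with one
-- stable min over the group keyed by a 0/1 folder priority: simpler.

-- ===== PORT A =====
-- '/posts/' in file_path or file_path.split('/media/')[-1].startswith('posts/')
-- split with a non-empty separator always returns a non-empty list, so [-1] is its last element (getLastD is exact).
def is_from_posts_folder (file_path : String) : Bool :=
  PySem.Str.isIn "/posts/" file_path ||
    PySem.Str.startswith (((PySem.Str.split? file_path "/media/").getD []).getLastD "") "posts/"

-- m.get('file_path', '') on the association list m
def pvGetFilePath (m : List (String × String)) : String :=
  (PySem.Dict.mk m).getD "file_path" ""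

def select_best_version (hash_group : List (List (String × String))) : List (String × String) :=
  if hash_group.length = 1 then hash_group.headD []   -- hash_group[0]; nonempty here
  else
    let posts_versions := hash_group.filter (fun m => is_from_posts_folder (pvGetFilePath m))
    let archived_versions := hash_group.filter (fun m => !is_from_posts_folder (pvGetFilePath m))
    if posts_versions ≠ [] then posts_versions.headD []
    else if archived_versions ≠ [] then archived_versions.headD []
    else hash_group.headD []   -- hash_group[0]; Python raises IndexError here (empty input), excluded by Pre_

-- ===== PORT B =====
def is_from_posts_folder_alt (file_path : String) : Bool :=
  PySem.Str.isIn "/posts/" file_path ||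
    PySem.Str.startswith (((PySem.Str.split? file_path "/media/").getD []).getLastD "") "posts/"

-- the 0/1 priority key of the min call
def sbv_key (m : List (String × String)) : Int :=
  if is_from_posts_folder_alt ((PySem.Dict.mk m).getD "file_path" "") then 0 else 1

-- min(hash_group, key=...) = PySem.List.min? (stable first-minimum);
-- Python's min raises ValueError on the empty list (excluded by Pre_), here getD [].
def select_best_version_alt (hash_group : List (List (String × String))) : List (String × String) :=
  (PySem.List.min? hash_group sbv_key).getD []

-- ===== PRECONDITION & SPEC =====
-- Both Pythons raise on the empty list (A IndexError, B ValueError); Pre_ excludes exactly that input.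
def Pre_select_best_version (hash_group : List (List (String × String))) : Prop := hash_group ≠ []
instance (hash_group : List (List (String × String))) : Decidable (Pre_select_best_version hash_group) := by unfold Pre_select_best_version; infer_instance
def pvWitness_select_best_version : (List (List (String × String))) := [[("file_path", "a/posts/x.jpg")], [("file_path", "archived_posts/x.jpg")]]

def Spec_select_best_version (hash_group : List (List (String × String))) (out : List (String × String)) : Prop := out = select_best_version_alt hash_group
instance (hash_group : List (List (String × String))) (out : List (String × String)) : Decidable (Spec_select_best_version hash_group out) := by unfold Spec_select_best_version; infer_instance

-- ===== CLAIM (what is proved, stated in full; the proofs are below) =====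
def Claim_equal_select_best_version : Prop := ∀ (hash_group : List (List (String × String))), Dom_select_best_version hash_group → Pre_select_best_version hash_group → Spec_select_best_version hash_group (select_best_version hash_group)

-- ===== LEMMAS AND PROOFS =====

-- the predicate the key encodes
def sbv_p (m : List (String × String)) : Bool :=
  is_from_posts_folder_alt ((PySem.Dict.mk m).getD "file_path" "")

lemma sbv_key_eq (m : List (String × String)) :
    sbv_key m = if sbv_p m then (0 : Int) else 1 := rfl

-- one step of min's running-minimum loop: fold the head pair into its stable minimum
lemma min?_cons_cons (a b : List (String × String)) (l : List (List (String × String))) :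
    PySem.List.min? (a :: b :: l) sbv_key =
      PySem.List.min? ((if sbv_key b < sbv_key a then b else a) :: l) sbv_key := by
  simp only [PySem.List.min?, List.foldl_cons]
  split <;> rfl

-- once the running minimum is a posts-folder member, it is frozen
lemma sbv_min_posts (t : List (List (String × String))) (m : List (String × String))
    (hm : sbv_p m = true) :
    PySem.List.min? (m :: t) sbv_key = some m := by
  induction t generalizing m with
  | nil => rfl
  | cons x t ih =>
      rw [min?_cons_cons m x t]
      have hlt : ¬ sbv_key x < sbv_key m := by
        rcases Bool.eq_false_or_eq_true (sbv_p x) with h | h <;>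
          simp [sbv_key_eq, hm, h]
      rw [if_neg hlt]
      exact ih m hm
-- with an archived running minimum, min picks the first posts-folder member of the rest, if any
lemma sbv_min_arch (t : List (List (String × String))) (m : List (String × String))
    (hm : sbv_p m = false) :
    PySem.List.min? (m :: t) sbv_key = some (((t.filter sbv_p).head?).getD m) := by
  induction t generalizing m with
  | nil => rfl
  | cons x t ih =>
      rw [min?_cons_cons m x t]
      by_cases hx : sbv_p x = true
      · have hlt : sbv_key x < sbv_key m := by
          simp [sbv_key_eq, hm, hx]
        rw [if_pos hlt]
        simp [hx, sbv_min_posts t x hx]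
      · have hx' : sbv_p x = false := by simpa using hx
        have hlt : ¬ sbv_key x < sbv_key m := by
          simp [sbv_key_eq, hm, hx']
        rw [if_neg hlt]
        simp [List.filter_cons, hx', ih m hm]

-- min? with the 0/1 key = first posts-folder member, else first member
lemma min?_sbv (g : List (List (String × String))) (hne : g ≠ []) :
    PySem.List.min? g sbv_key = some (((g.filter sbv_p).head?).getD (g.headD [])) := by
  match g with
  | [] => exact absurd rfl hne
  | m :: t =>
      by_cases hm : sbv_p m = true
      · simpa [List.filter_cons, hm] using sbv_min_posts t m hm
      · have hm' : sbv_p m = false := by simpa using hm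
        simpa [List.filter_cons, hm'] using sbv_min_arch t m hm'

lemma pred_eq (m : List (String × String)) :
    is_from_posts_folder (pvGetFilePath m) = sbv_p m := rfl

-- ===== VERDICT (by name: the statement is the Claim_ definition above) =====
theorem select_best_version_spec : Claim_equal_select_best_version := by
  intro g _ hne
  unfold Spec_select_best_version select_best_version select_best_version_alt
  rw [min?_sbv g hne]
  have hfA : (fun m => is_from_posts_folder (pvGetFilePath m)) = sbv_p := by
    funext m; exact pred_eq m
  rw [hfA]
  by_cases hlen : g.length = 1
  · obtain ⟨m, rfl⟩ : ∃ m, g = [m] := by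
      match g, hlen with
      | [m], _ => exact ⟨m, rfl⟩
    simp only [if_pos hlen, List.filter_cons]
    by_cases h : sbv_p m = true <;> simp [h]
  · simp only [if_neg hlen]
    by_cases hposts : g.filter sbv_p = []
    · have harch : g.filter (fun m => !is_from_posts_folder (pvGetFilePath m)) = g := by
        rw [List.filter_eq_self]
        intro a ha
        have := List.filter_eq_nil_iff.mp hposts a ha
        simpa [pred_eq] using this
      rw [hposts, harch]
      simp
    · cases hf : g.filter sbv_p with
      | nil => exact absurd hf hposts
      | cons x xs => simp
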